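-- pv_equiv track=rewrite | github.com/wilmurillo-ai/Design-Assistant | .skills/openclaw-skills/skills/jonathangu/crabpath/crabpath/sync.py | _group_by_file
-- ===== SOURCE A (Python) =====
-- from collections import defaultdict
--
-- def _split_node_id(node_id: str) -> tuple[str | None, int | None]:
--     """Split ``file::chunk`` style node IDs."""
--     if "::" not in node_id:
--         return None, None
--     file_name, chunk_text = node_id.rsplit("::", 1)
--     try:
--         return file_name, int(chunk_text)
--     except ValueError:
--         return None, None
--
-- def _group_by_file(node_ids: set[str] | list[str]) -> dict[str, list[tuple[int, str]]]:
--     """Group node IDs by source file and chunk index."""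
--     grouped: dict[str, list[tuple[int, str]]] = defaultdict(list)
--     for node_id in node_ids:
--         file_name, chunk_idx = _split_node_id(node_id)
--         if file_name is None or chunk_idx is None:
--             continue
--         grouped[file_name].append((chunk_idx, node_id))
--     for file_name, entries in grouped.items():
--         entries.sort(key=lambda item: item[0])
--     return grouped
-- ===== SOURCE B (Python) =====
-- from collections import defaultdict
--
-- def _split_node_id(node_id):
--     """Split ``file::chunk`` style node IDs (same module helper as A)."""
--     if "::" not in node_id:
--         return None, None
--     file_name, chunk_text = node_id.rsplit("::", 1)
--     try:
--         return file_name, int(chunk_text)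
--     except ValueError:
--         return None, None
--
-- def _group_by_file(node_ids):
--     """Group node IDs by source file and chunk index: parse once, sort the
--     whole list of valid entries once (stable), then slice it per file."""
--     pairs = []
--     for node_id in node_ids:
--         file_name, chunk_idx = _split_node_id(node_id)
--         if file_name is not None and chunk_idx is not None:
--             pairs.append((file_name, (chunk_idx, node_id)))
--     files = list(dict.fromkeys(f for f, _ in pairs))
--     pairs.sort(key=lambda p: p[1][0])
--     grouped = defaultdict(list)
--     for f in files:
--         grouped[f] = [v for g, v in pairs if g == f]
--     return grouped
-- ===== Notes on version B (the rewrite author's own statement) =====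
-- stated objective: alternative
-- what changed: B parses all ids in one pass into (file,(chunk,id)) pairs, performs ONE global stable sort by chunk index and then builds each file's bucket by filtering that sorted list per first-occurrence file order, instead of A's appending into per-file dict buckets and sorting each bucket separately.
import Mathlib
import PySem

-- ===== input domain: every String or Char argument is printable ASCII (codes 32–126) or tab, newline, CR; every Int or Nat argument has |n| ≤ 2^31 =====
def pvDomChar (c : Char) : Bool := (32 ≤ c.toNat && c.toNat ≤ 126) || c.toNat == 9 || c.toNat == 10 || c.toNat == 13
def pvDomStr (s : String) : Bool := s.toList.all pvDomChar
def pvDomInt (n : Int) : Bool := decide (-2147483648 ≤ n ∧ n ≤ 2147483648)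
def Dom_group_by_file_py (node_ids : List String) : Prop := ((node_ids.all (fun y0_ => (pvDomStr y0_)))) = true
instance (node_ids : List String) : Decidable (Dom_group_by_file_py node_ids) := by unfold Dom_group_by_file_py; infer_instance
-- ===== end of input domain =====

-- B groups by one global stable sort over all parsed entries instead of A's per-file bucket sorts; same result, proved equal (alternative decomposition, no speed claim).

-- ===== PORT A =====
-- module helper _split_node_id as A's code uses it
def split_node_id (node_id : String) : Option String × Option Int :=
  if PySem.Str.isIn "::" node_id = false then (none, none)
  else
    -- rsplit("::", 1) ported by hand: split at the HIGHEST occurrence of "::" (exact: rfind returns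
    -- that index, and it is ≥ 0 here because "::" occurs in node_id)
    let i := (PySem.Str.rfind node_id "::").toNat
    let file_name := String.ofList (node_id.toList.take i)
    let chunk_text := node_id.toList.drop (i + 2)
    match PySem.Int.ofChars? chunk_text with
    | some k => (some file_name, some k)
    | none => (none, none)

def group_by_file_py (node_ids : List String) : List (String × List (Int × String)) :=
  let grouped := node_ids.foldl (fun (d : PySem.Dict String (List (Int × String))) nid =>
      match split_node_id nid with
      | (some f, some c) => d.modify f [] (fun l => l ++ [(c, nid)])
      | _ => d) PySem.Dict.empty
  grouped.items.map (fun p => (p.1, PySem.List.sorted p.2 (fun it => it.1)))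

-- ===== PORT B =====
-- B's own copy of the module helper _split_node_id (the ports may not share code)
def split_node_id_b (node_id : String) : Option String × Option Int :=
  if PySem.Str.isIn "::" node_id = false then (none, none)
  else
    let i := (PySem.Str.rfind node_id "::").toNat
    let file_name := String.ofList (node_id.toList.take i)
    let chunk_text := node_id.toList.drop (i + 2)
    match PySem.Int.ofChars? chunk_text with
    | some k => (some file_name, some k)
    | none => (none, none)

def alt_valid_pairs (node_ids : List String) : List (String × (Int × String)) :=
  node_ids.foldl (fun acc nid =>
    let r := split_node_id_b nid
    match r.1 with
    | none => acc
    | some f =>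
      match r.2 with
      | none => acc
      | some c => acc ++ [(f, (c, nid))]) []

def group_by_file_py_alt (node_ids : List String) : List (String × List (Int × String)) :=
  let pairs := alt_valid_pairs node_ids
  let files := PySem.List.dedup (pairs.map (fun p => p.1))
  let sortedPairs := PySem.List.sorted pairs (fun p => p.2.1)
  files.map (fun f => (f, (sortedPairs.filter (fun p => p.1 == f)).map (fun p => p.2)))

-- ===== PRECONDITION & SPEC =====
def Spec_group_by_file_py (node_ids : List String) (out : List (String × List (Int × String))) : Prop := out = group_by_file_py_alt node_ids
instance (node_ids : List String) (out : List (String × List (Int × String))) : Decidable (Spec_group_by_file_py node_ids out) := by unfold Spec_group_by_file_py; infer_instance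

-- ===== CLAIM (what is proved, stated in full; the proofs are below) =====
def Claim_equal_group_by_file_py : Prop := ∀ (node_ids : List String), Dom_group_by_file_py node_ids → Spec_group_by_file_py node_ids (group_by_file_py node_ids)

-- ===== LEMMAS AND PROOFS =====

-- the (at most one) pair a single node id contributes
def pairsOf (nid : String) : List (String × (Int × String)) :=
  match split_node_id nid with
  | (some f, some c) => [(f, (c, nid))]
  | _ => []

theorem alt_valid_pairs_eq_flatMap (node_ids : List String) :
    alt_valid_pairs node_ids = node_ids.flatMap pairsOf := by
  have h : ∀ (ns : List String) (acc : List (String × (Int × String))),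
      ns.foldl (fun acc nid =>
        let r := split_node_id_b nid
        match r.1 with
        | none => acc
        | some f =>
          match r.2 with
          | none => acc
          | some c => acc ++ [(f, (c, nid))]) acc = acc ++ ns.flatMap pairsOf := by
    intro ns
    induction ns with
    | nil => simp
    | cons n ns ih =>
      intro acc
      rcases hsp : split_node_id n with ⟨of, oc⟩
      have hspb : split_node_id_b n = (of, oc) := hsp
      match of, oc with
      | some f, some c => simp [pairsOf, hsp, hspb, ih]
      | some f, none => simp [pairsOf, hsp, hspb, ih]
      | none, some c => simp [pairsOf, hsp, hspb, ih]
      | none, none => simp [pairsOf, hsp, hspb, ih]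
  exact h node_ids []

theorem foldl_modify_eq (node_ids : List String) (d : PySem.Dict String (List (Int × String))) :
    node_ids.foldl (fun d nid =>
      match split_node_id nid with
      | (some f, some c) => d.modify f [] (fun l => l ++ [(c, nid)])
      | _ => d) d
    = (node_ids.flatMap pairsOf).foldl (fun d p => d.modify p.1 [] (fun l => l ++ [p.2])) d := by
  induction node_ids generalizing d with
  | nil => rfl
  | cons n ns ih =>
    rcases hsp : split_node_id n with ⟨of, oc⟩
    match of, oc with
    | some f, some c => simp [pairsOf, hsp, ih]
    | some f, none => simp [pairsOf, hsp, ih]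
    | none, some c => simp [pairsOf, hsp, ih]
    | none, none => simp [pairsOf, hsp, ih]

theorem insertBy_map {A B K : Type} [LT K] [DecidableLT K] (key : B -> K) (g : A -> B) (x : A) (s : List A) :
    (PySem.List.insertBy (fun a b => decide (key (g a) < key (g b))) x s).map g
    = PySem.List.insertBy (fun a b => decide (key a < key b)) (g x) (s.map g) := by
  induction s with
  | nil => rfl
  | cons y ys ih =>
    simp only [PySem.List.insertBy, List.map_cons]
    by_cases h : key (g x) < key (g y)
    · simp [h]
    · simp [h, ih]

theorem sorted_append_singleton {A K : Type} [LT K] [DecidableLT K] (xs : List A) (x : A) (key : A -> K) :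
    PySem.List.sorted (xs ++ [x]) key
    = PySem.List.insertBy (fun a b => decide (key a < key b)) x (PySem.List.sorted xs key) := by
  rw [PySem.List.sorted_eq_foldl_insertBy, PySem.List.sorted_eq_foldl_insertBy, List.foldl_append]
  rfl

theorem sorted_map {A B K : Type} [LinearOrder K] (xs : List A) (g : A -> B) (key : B -> K) :
    PySem.List.sorted (xs.map g) key = (PySem.List.sorted xs (fun a => key (g a))).map g := by
  induction xs using List.reverseRecOn with
  | nil => rfl
  | append_singleton xs x ih =>
    rw [List.map_append, List.map_singleton, sorted_append_singleton, sorted_append_singleton, ih,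
      insertBy_map]

theorem insertBy_cons_of_forall {A K : Type} [LinearOrder K] (key : A -> K) (x : A) (s : List A)
    (h : ∀ b ∈ s, key x < key b) :
    PySem.List.insertBy (fun a b => decide (key a < key b)) x s = x :: s := by
  cases s with
  | nil => rfl
  | cons y ys => simp [PySem.List.insertBy, h y (List.mem_cons_self)]

theorem insertBy_filter {A K : Type} [LinearOrder K] (key : A -> K) (p : A -> Bool) (x : A) (s : List A)
    (hs : s.Pairwise (fun a b => key a ≤ key b)) :
    (PySem.List.insertBy (fun a b => decide (key a < key b)) x s).filter p
    = if p x then PySem.List.insertBy (fun a b => decide (key a < key b)) x (s.filter p) else s.filter p := by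
  induction s with
  | nil => cases hp : p x <;> simp [PySem.List.insertBy, List.filter, hp]
  | cons y ys ih =>
    rw [List.pairwise_cons] at hs
    obtain ⟨hy, hys⟩ := hs
    by_cases hlt : key x < key y
    · have hall : ∀ b ∈ ys.filter p, key x < key b := by
        intro b hb
        exact lt_of_lt_of_le hlt (hy b (List.mem_of_mem_filter hb))
      cases hp : p x with
      | true =>
        cases hpy : p y with
        | true =>
          simp [PySem.List.insertBy, hlt, List.filter, hp, hpy]
        | false =>
          simp only [PySem.List.insertBy, hlt, decide_true, if_true, List.filter, hp, hpy]
          rw [insertBy_cons_of_forall key x _ hall]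
      | false =>
        simp [PySem.List.insertBy, hlt, List.filter, hp]
    · cases hpy : p y <;> cases hp : p x <;>
        simp [PySem.List.insertBy, hlt, hpy, hp, ih hys]

theorem sorted_filter {A K : Type} [LinearOrder K] (xs : List A) (p : A -> Bool) (key : A -> K) :
    (PySem.List.sorted xs key).filter p = PySem.List.sorted (xs.filter p) key := by
  induction xs using List.reverseRecOn with
  | nil => rfl
  | append_singleton xs x ih =>
    rw [sorted_append_singleton, insertBy_filter key p x _ (PySem.List.sorted_pairwise xs key),
      List.filter_append, ih]
    cases hp : p x with
    | true => simp [hp, sorted_append_singleton]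
    | false => simp [hp]

theorem bucket_eq (pairs : List (String × (Int × String))) (f : String) :
    PySem.List.sorted ((pairs.filter (fun p => p.1 == f)).map (fun p => p.2)) (fun it => it.1)
    = ((PySem.List.sorted pairs (fun p => p.2.1)).filter (fun p => p.1 == f)).map (fun p => p.2) := by
  rw [sorted_filter, sorted_map]

-- ===== VERDICT (by name: the statement is the Claim_ definition above) =====
theorem group_by_file_py_spec : Claim_equal_group_by_file_py := by
  intro node_ids _
  unfold Spec_group_by_file_py group_by_file_py group_by_file_py_alt
  dsimp only
  rw [foldl_modify_eq, alt_valid_pairs_eq_flatMap]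
  set pairs := node_ids.flatMap pairsOf with hpairs
  set d := pairs.foldl (fun d p => d.modify p.1 [] (fun l => l ++ [p.2])) PySem.Dict.empty with hd
  have hnd : d.keys.Nodup := by
    rw [hd]
    exact PySem.Dict.nodup_keys_foldl_modify_key pairs (fun p => p.1) []
      (fun _ p => fun l => l ++ [p.2]) PySem.Dict.empty (by simp)
  have hkeys : d.keys = PySem.List.dedup (pairs.map (fun p => p.1)) := by
    rw [hd]
    rw [PySem.Dict.keys_foldl_modify_key pairs (fun p => p.1) [] (fun _ p => fun l => l ++ [p.2])]
    simp [PySem.Set.update_eq_append_filter, PySem.Dict.keys_empty]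
  have hgetD : ∀ f, d.getD f [] = (pairs.filter (fun p => p.1 == f)).map (fun p => p.2) := by
    intro f
    rw [hd, PySem.Dict.getD_foldl_modify_append]
    simp [PySem.Dict.getD_empty]
  rw [PySem.Dict.items_eq_map_keys d hnd [], hkeys]
  rw [List.map_map]
  refine List.map_congr_left ?_
  intro f _
  simp only [Function.comp]
  rw [hgetD, bucket_eq]
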